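-- pv_equiv track=rewrite | github.com/PierreVieira/Python_Curso_Em_Video | ex083.py | abrindo_e_fechando_corretamente
-- ===== SOURCE A (Python) =====
-- def abrindo_e_fechando_corretamente(expressao):
--     anterior = ''
--     for c in expressao:
--         if anterior != '' and (anterior == ')' and c == '('):
--             return False
--         else:
--             anterior = c
--     return True
-- ===== SOURCE B (Python) =====
-- def abrindo_e_fechando_corretamente(expressao):
--     # Staged algorithm: split the expression at every ')'; the text is bad
--     # exactly when some segment AFTER a ')' begins with '(' (i.e. ')(' was adjacent).
--     segmentos = expressao.split(')')
--     return all(not seg.startswith('(') for seg in segmentos[1:])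
-- ===== Notes on version B (the rewrite author's own statement) =====
-- stated objective: alternative
-- what changed: Instead of a single pass that tracks the previous character, B splits the expression at every closing parenthesis and then checks that no segment following one begins with an opening parenthesis, a two-stage split-then-scan algorithm.
import Mathlib
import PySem

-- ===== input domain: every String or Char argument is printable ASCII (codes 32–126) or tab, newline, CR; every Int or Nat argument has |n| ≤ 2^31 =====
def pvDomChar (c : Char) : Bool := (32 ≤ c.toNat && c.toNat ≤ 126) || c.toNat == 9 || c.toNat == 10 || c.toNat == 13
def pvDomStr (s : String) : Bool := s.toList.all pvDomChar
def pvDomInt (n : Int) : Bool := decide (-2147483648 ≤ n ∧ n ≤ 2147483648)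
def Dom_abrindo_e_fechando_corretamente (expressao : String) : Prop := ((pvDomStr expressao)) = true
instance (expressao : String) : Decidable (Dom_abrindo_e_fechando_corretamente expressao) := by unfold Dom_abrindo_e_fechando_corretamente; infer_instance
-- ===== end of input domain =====

-- B replaces A's previous-character state loop by a two-stage split-then-scan:
-- split at ')' and check no following segment starts with '(' (alternative decomposition, same cost).

-- ===== PORT A =====
-- A's loop with the 'anterior' state variable; anterior is '' or a one-char string → List Char
def pvGoA : List Char → List Char → Bool
  | _, [] => true
  | anterior, c :: rest =>
    if anterior ≠ [] ∧ (anterior = [')'] ∧ c = '(') then false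
    else pvGoA [c] rest

def abrindo_e_fechando_corretamente (expressao : String) : Bool :=
  pvGoA [] expressao.toList

-- ===== PORT B =====
-- expressao.split(')') → PySem.Chars.splitOn (sep nonempty); segmentos[1:] → drop 1; all(...) → List.all
def abrindo_e_fechando_corretamente_alt (expressao : String) : Bool :=
  let segmentos := PySem.Chars.splitOn expressao.toList [')']
  (segmentos.drop 1).all (fun seg => !(PySem.Chars.startswith seg ['(']))

-- ===== PRECONDITION & SPEC =====
def Spec_abrindo_e_fechando_corretamente (expressao : String) (out : Bool) : Prop := out = abrindo_e_fechando_corretamente_alt expressao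
instance (expressao : String) (out : Bool) : Decidable (Spec_abrindo_e_fechando_corretamente expressao out) := by unfold Spec_abrindo_e_fechando_corretamente; infer_instance

-- ===== CLAIM (what is proved, stated in full; the proofs are below) =====
def Claim_equal_abrindo_e_fechando_corretamente : Prop := ∀ (expressao : String), Dom_abrindo_e_fechando_corretamente expressao → Spec_abrindo_e_fechando_corretamente expressao (abrindo_e_fechando_corretamente expressao)

-- ===== LEMMAS AND PROOFS =====

-- Both sides are characterised by the same proposition: "[')','('] is not an infix".

theorem pvInfix_cons_char (c : Char) (l : List Char) :
    ([')', '('] <:+: (c :: l)) ↔ ((c = ')' ∧ l.head? = some '(') ∨ [')', '('] <:+: l) := by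
  rw [List.infix_cons_iff]
  constructor
  · rintro (hpre | hinf)
    · left
      rcases List.cons_prefix_cons.mp hpre with ⟨hp, hpre2⟩
      cases l with
      | nil => simp at hpre2
      | cons d r =>
        rcases List.cons_prefix_cons.mp hpre2 with ⟨hd, _⟩
        exact ⟨hp.symm, by simp [hd.symm]⟩
    · right; exact hinf
  · rintro (⟨hp, hc⟩ | hinf)
    · left
      cases l with
      | nil => simp at hc
      | cons d r =>
        simp only [List.head?_cons, Option.some.injEq] at hc
        subst hp; subst hc
        exact List.cons_prefix_cons.mpr ⟨rfl, List.cons_prefix_cons.mpr ⟨rfl, List.nil_prefix⟩⟩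
    · right; exact hinf

-- A-side characterisation
theorem pvGoA_one (p : Char) (l : List Char) :
    pvGoA [p] l = !decide ([')', '('] <:+: (p :: l)) := by
  induction l generalizing p with
  | nil =>
    have hni : ¬ ([')', '('] <:+: [p]) := fun h => by
      have := h.length_le; simp at this
    simp [pvGoA, hni]
  | cons c rest ih =>
    simp only [pvGoA, ih]
    have hiff : ([')', '('] <:+: (p :: c :: rest)) ↔ ((p = ')' ∧ c = '(') ∨ [')', '('] <:+: (c :: rest)) := by
      rw [pvInfix_cons_char]; simp
    by_cases hpc : p = ')' ∧ c = '('
    · have : [p] ≠ ([] : List Char) ∧ ([p] = [')'] ∧ c = '(') := by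
        refine ⟨by simp, by simp [hpc.1], hpc.2⟩
      rw [if_pos this]
      have : ([')', '('] <:+: (p :: c :: rest)) := hiff.mpr (Or.inl hpc)
      simp [this]
    · have hcond : ¬ ([p] ≠ ([] : List Char) ∧ ([p] = [')'] ∧ c = '(')) := by
        rintro ⟨_, h1, h2⟩
        exact hpc ⟨by simpa using h1, h2⟩
      rw [if_neg hcond]
      have : ([')', '('] <:+: (p :: c :: rest)) ↔ ([')', '('] <:+: (c :: rest)) := by
        rw [hiff]; tauto
      simp [this]

theorem pvGoA_nil (l : List Char) :
    pvGoA [] l = !decide ([')', '('] <:+: l) := by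
  cases l with
  | nil =>
    have hni : ¬ ([')', '('] <:+: ([] : List Char)) := fun h => by
      have := h.length_le; simp at this
    simp [pvGoA, hni]
  | cons c rest =>
    simp only [pvGoA]
    rw [if_neg (by simp)]
    exact pvGoA_one c rest

-- B-side: a structural description of splitOn at the single-character separator ')'
def pvFirstSeg : List Char → List Char
  | [] => []
  | c :: r => if c = ')' then [] else c :: pvFirstSeg r

def pvTailSegs : List Char → List (List Char)
  | [] => []
  | c :: r => if c = ')' then pvFirstSeg r :: pvTailSegs r else pvTailSegs r

def pvSplitGo : List Char → List Char → List (List Char)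
  | [], cur => [cur.reverse]
  | c :: rest, cur => if c = ')' then cur.reverse :: pvSplitGo rest [] else pvSplitGo rest (c :: cur)

theorem pvGo_eq (fuel : Nat) : ∀ (l cur : List Char) (acc : List (List Char)), l.length ≤ fuel →
    PySem.Chars.splitOn.go [')'] fuel l cur acc = acc.reverse ++ pvSplitGo l cur := by
  induction fuel with
  | zero =>
    intro l cur acc h
    have : l = [] := List.eq_nil_of_length_eq_zero (Nat.le_zero.mp h)
    subst this
    rw [PySem.Chars.splitOn.go.eq_1]
    simp [pvSplitGo]
  | succ f ih =>
    intro l cur acc h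
    cases l with
    | nil =>
      rw [PySem.Chars.splitOn.go.eq_2 _ _ _ _ (by omega)]
      simp [pvSplitGo]
    | cons c rest =>
      rw [PySem.Chars.splitOn.go.eq_3]
      by_cases hc : c = ')'
      · subst hc
        simp only [List.length_cons] at h
        rw [if_pos (by simp [List.isPrefixOf])]
        simp only [List.length_singleton, List.drop_one, List.tail_cons]
        rw [ih rest [] _ (by omega)]
        simp [pvSplitGo]
      · rw [if_neg (by simp [List.isPrefixOf]; exact fun h' => hc h'.symm)]
        rw [ih rest (c :: cur) acc (by simp at h; omega)]
        simp [pvSplitGo, hc]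

theorem pvSplitGo_eq (l : List Char) : ∀ cur, pvSplitGo l cur = (cur.reverse ++ pvFirstSeg l) :: pvTailSegs l := by
  induction l with
  | nil => intro cur; simp [pvSplitGo, pvFirstSeg, pvTailSegs]
  | cons c r ih =>
    intro cur
    by_cases hc : c = ')'
    · subst hc; simp [pvSplitGo, pvFirstSeg, pvTailSegs, ih []]
    · simp [pvSplitGo, pvFirstSeg, pvTailSegs, hc, ih (c :: cur)]

theorem pvSw_eq (s p : List Char) : PySem.Chars.startswith s p = decide (p <+: s) := by
  by_cases h : p <+: s
  · simpa [h] using (PySem.Chars.startswith_iff s p).mpr h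
  · rcases hh : PySem.Chars.startswith s p with _ | _
    · simp [h]
    · exact absurd ((PySem.Chars.startswith_iff s p).mp hh) h

theorem pvFirstSeg_sw (r : List Char) :
    PySem.Chars.startswith (pvFirstSeg r) ['('] = decide (r.head? = some '(') := by
  cases r with
  | nil =>
    have : ¬ (['('] <+: ([] : List Char)) := by simp
    simp [pvFirstSeg, pvSw_eq, this]
  | cons c rest =>
    by_cases hc : c = ')'
    · subst hc
      have : ¬ (['('] <+: ([] : List Char)) := by simp
      simp [pvFirstSeg, pvSw_eq, this]
    · simp only [pvFirstSeg, if_neg hc, List.head?_cons]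
      by_cases hp : c = '('
      · subst hp
        simp [pvSw_eq, List.cons_prefix_cons]
      · have : ¬ (['('] <+: (c :: pvFirstSeg rest)) := by
          intro h; exact hp (List.cons_prefix_cons.mp h).1.symm
        simp [pvSw_eq, this, hp]

theorem pvTailSegs_all (l : List Char) :
    (pvTailSegs l).all (fun seg => !(PySem.Chars.startswith seg ['('])) = !decide ([')', '('] <:+: l) := by
  induction l with
  | nil =>
    have : ¬ ([')', '('] <:+: ([] : List Char)) := fun h => by have := h.length_le; simp at this
    simp [pvTailSegs, this]
  | cons c r ih =>
    by_cases hc : c = ')'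
    · subst hc
      have hd : decide ([')', '('] <:+: (')' :: r)) = (decide (r.head? = some '(') || decide ([')', '('] <:+: r)) := by
        rw [Bool.eq_iff_iff]; simp [pvInfix_cons_char ')' r]
      simp [pvTailSegs, pvFirstSeg_sw, ih, hd]
    · have hd : decide ([')', '('] <:+: (c :: r)) = decide ([')', '('] <:+: r) := by
        rw [Bool.eq_iff_iff]
        simp only [decide_eq_true_eq]
        rw [pvInfix_cons_char c r]
        constructor
        · rintro (⟨h1, _⟩ | h) <;> [exact absurd h1 hc; exact h]
        · exact fun h => Or.inr h
      simp [pvTailSegs, hc, ih, hd]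

theorem pvAlt_char (s : String) :
    abrindo_e_fechando_corretamente_alt s = !decide ([')', '('] <:+: s.toList) := by
  unfold abrindo_e_fechando_corretamente_alt
  show ((PySem.Chars.splitOn s.toList [')']).drop 1).all _ = _
  unfold PySem.Chars.splitOn
  rw [pvGo_eq _ _ _ _ (by omega), pvSplitGo_eq]
  simpa using pvTailSegs_all s.toList

-- ===== VERDICT (by name: the statement is the Claim_ definition above) =====
theorem abrindo_e_fechando_corretamente_spec : Claim_equal_abrindo_e_fechando_corretamente := by
  intro s _
  unfold Spec_abrindo_e_fechando_corretamente abrindo_e_fechando_corretamente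
  rw [pvGoA_nil, pvAlt_char]
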